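-- pv_equiv track=rewrite | github.com/r-jy/tensor-DFAs | DfaSearchSim.py | acceptStrings4
-- ===== SOURCE A (Python) =====
-- import copy
--
-- def acceptStrings4(tensor,maxLen):
-- 	init_state = 0
--
-- 	num_states = len(tensor[0]) # number of states in the DFA
-- 	alphabet_size = len(tensor) # number of symbols in alphabet
-- 	# Initialize table to be filled up using DP. The value string_table[source][dest][e] will
-- 	# store the possible walks from source to dest with exactly e edges
-- 	cell_content = set()
-- 	row = [copy.deepcopy(cell_content) for i in range(maxLen)]
-- 	matrix = [copy.deepcopy(row) for i in range(num_states)]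
-- 	string_table = [copy.deepcopy(matrix) for i in range(num_states)]
--
-- 	# Now fill in table
-- 	for e in range(maxLen): # Loop for number of state transitions from 0 to str_len
-- 		for source in range(num_states):  # for source
-- 			for dest in range(num_states):  # for destination
-- 				for sym in range(alphabet_size):
-- 					sym_adj_matrix = tensor[sym] # adjacency matrix representation of DFA states and transitions for one symbol in alphabet
--
-- 					# from base cases
-- 					if (e == 0) and (source == dest):
-- 						string_table[source][dest][e].add('')
--
-- 					if (e == 1) and (sym_adj_matrix[source][dest] == 1):
-- 						string_table[source][dest][e].add(str(sym))
--
-- 					# go to adjacent only when number of edges is more than 1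
-- 					if e > 1:
-- 						for a in range(num_states):  # for every possibly adjacent state
-- 							if sym_adj_matrix[source][a] == 1:  # if there is a transition from source state to a^th state
-- 								str_l = string_table[a][dest][e - 1]
-- 								for string in str_l.copy():
-- 									string_table[source][dest][e].add(str(sym) + string)
--
-- 	return string_table
-- ===== SOURCE B (Python) =====
-- def acceptStrings4(tensor, maxLen):
-- 	num_states = len(tensor[0])
-- 	alphabet_size = len(tensor)
-- 	table = [[[set() for e in range(maxLen)] for d in range(num_states)]
-- 	         for s in range(num_states)]
-- 	# forward BFS from each source: a frontier of (state, walk-string) pairs,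
-- 	# extended one edge at a time (appending the symbol keeps leftmost-first order)
-- 	for source in range(num_states):
-- 		if maxLen >= 1:
-- 			table[source][source][0].add('')
-- 		frontier = [(source, '')]
-- 		for e in range(1, maxLen):
-- 			new_frontier = []
-- 			for st, t in frontier:
-- 				for sym in range(alphabet_size):
-- 					row = tensor[sym][st]
-- 					for b in range(num_states):
-- 						if row[b] == 1:
-- 							w = t + str(sym)
-- 							new_frontier.append((b, w))
-- 							table[source][b][e].add(w)
-- 			frontier = new_frontier
-- 	return table
-- ===== Notes on version B (the rewrite author's own statement) =====
-- stated objective: alternative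
-- what changed: B replaces A's length-by-length DP over all (source,dest) cells (combining an edge with the stored suffix sets of the previous level) by an independent forward BFS from each source: a frontier of (state, walk-string) pairs is extended one edge at a time, appending the new symbol, and each reached pair is recorded into its cell.
import Mathlib
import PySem

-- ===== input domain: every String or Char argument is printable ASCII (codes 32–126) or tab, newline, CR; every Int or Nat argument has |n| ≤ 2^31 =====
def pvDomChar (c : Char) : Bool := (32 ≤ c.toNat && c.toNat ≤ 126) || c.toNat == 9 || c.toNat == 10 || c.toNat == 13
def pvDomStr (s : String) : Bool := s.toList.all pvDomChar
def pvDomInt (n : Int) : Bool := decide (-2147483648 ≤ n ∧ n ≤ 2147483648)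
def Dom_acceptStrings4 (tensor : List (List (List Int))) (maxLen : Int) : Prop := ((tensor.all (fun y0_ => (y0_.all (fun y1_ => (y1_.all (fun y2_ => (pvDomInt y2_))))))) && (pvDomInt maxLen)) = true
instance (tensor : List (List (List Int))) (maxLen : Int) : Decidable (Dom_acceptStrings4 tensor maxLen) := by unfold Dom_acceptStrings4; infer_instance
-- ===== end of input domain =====

-- B replaces A's length-by-length DP over all (source,dest) cells by an independent forward
-- BFS per source: a frontier of (state, walk-string) pairs extended one edge at a time,
-- appending the new symbol; return-value equivalence only. Objective: alternative.

-- ===== PORT A =====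
-- Shared nested-list indexing helpers: `table[s][d][e].add(x)` and `table[s][d][e]`.
-- Inside both programs every index is in range by construction of the table, so `getD`/`modify`
-- are exact (Python would raise only on the `tensor` accesses, excluded by Pre_).
def pvAdd (T : List (List (List (List String)))) (s d e : Nat) (x : String) :
    List (List (List (List String))) :=
  T.modify s (fun M => M.modify d (fun r => r.modify e (fun c => PySem.Set.add c x)))

def pvCell (T : List (List (List (List String)))) (s d e : Nat) : List String :=
  ((T.getD s []).getD d []).getD e []

-- Python sets become PySem.Set String (lists of distinct elements; the cells are sets, so the
-- tester compares them ignoring order).  `range(k)` over the non-negative bounds used here is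
-- List.range; `range(maxLen)` with a possibly negative maxLen is List.range maxLen.toNat (exact).
def acceptStrings4 (tensor : List (List (List Int))) (maxLen : Int) :
    List (List (List (List String))) :=
  let num_states := (tensor.headD []).length        -- len(tensor[0]); tensor ≠ [] by Pre_
  let alphabet_size := tensor.length
  let row : List (List String) := (List.range maxLen.toNat).map (fun _ => [])
  let matrix : List (List (List String)) := (List.range num_states).map (fun _ => row)
  let string_table := (List.range num_states).map (fun _ => matrix)
  (List.range maxLen.toNat).foldl (fun T e =>
    (List.range num_states).foldl (fun T source =>
      (List.range num_states).foldl (fun T dest =>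
        (List.range alphabet_size).foldl (fun T sym =>
          let sym_adj_matrix := tensor.getD sym []
          let T := if e = 0 ∧ source = dest then pvAdd T source dest e "" else T
          let T := if e = 1 ∧ (sym_adj_matrix.getD source []).getD dest 0 = 1 then
              pvAdd T source dest e (PySem.Int.toStr (sym : Int)) else T
          if 1 < e then
            (List.range num_states).foldl (fun T a =>
              if (sym_adj_matrix.getD source []).getD a 0 = 1 then
                (pvCell T a dest (e - 1)).foldl (fun T str =>
                  pvAdd T source dest e (PySem.Int.toStr (sym : Int) ++ str)) T
              else T) T
          else T) T) T) T) string_table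

-- ===== PORT B =====
-- Forward BFS from each source: the pair state is (table, new_frontier); each frontier entry
-- (st, t) is extended along every edge st→b reading symbol sym, appending str(sym).
def acceptStrings4_alt (tensor : List (List (List Int))) (maxLen : Int) :
    List (List (List (List String))) :=
  let num_states := (tensor.headD []).length
  let alphabet_size := tensor.length
  let table : List (List (List (List String))) :=
    (List.range num_states).map (fun _ =>
      (List.range num_states).map (fun _ =>
        (List.range maxLen.toNat).map (fun _ => ([] : List String))))
  (List.range num_states).foldl (fun T source =>
    let T := if 1 ≤ maxLen then pvAdd T source source 0 "" else T
    ((List.range' 1 (maxLen.toNat - 1)).foldl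
      (fun TF e =>
        TF.2.foldl (fun TN p =>
          (List.range alphabet_size).foldl (fun TN sym =>
            let row := (tensor.getD sym []).getD p.1 []
            (List.range num_states).foldl (fun TN b =>
              if row.getD b 0 = 1 then
                let w := p.2 ++ PySem.Int.toStr (sym : Int)
                (pvAdd TN.1 source b e w, TN.2 ++ [(b, w)])
              else TN) TN) TN) (TF.1, ([] : List (Nat × String))))
      (T, [(source, "")])).1) table

-- ===== PRECONDITION & SPEC =====
-- Pre_ is exactly where the Python A returns: tensor nonempty (tensor[0] is read), and when
-- maxLen ≥ 2 every symbol matrix has ≥ n rows whose first n rows have ≥ n entries (the pass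
-- e = 1 indexes tensor[sym][source][dest] for every sym, source, dest < n).
def Pre_acceptStrings4 (tensor : List (List (List Int))) (maxLen : Int) : Prop :=
  tensor ≠ [] ∧ (2 ≤ maxLen → ∀ M ∈ tensor, (tensor.headD []).length ≤ M.length ∧
    ∀ r ∈ M.take (tensor.headD []).length, (tensor.headD []).length ≤ r.length)
instance (tensor : List (List (List Int))) (maxLen : Int) :
    Decidable (Pre_acceptStrings4 tensor maxLen) := by unfold Pre_acceptStrings4; infer_instance

def pvWitness_acceptStrings4 : List (List (List Int)) × Int := ([[[1, 0], [0, 1]]], 3)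

def Spec_acceptStrings4 (tensor : List (List (List Int))) (maxLen : Int)
    (out : List (List (List (List String)))) : Prop := out = acceptStrings4_alt tensor maxLen
instance (tensor : List (List (List Int))) (maxLen : Int)
    (out : List (List (List (List String)))) : Decidable (Spec_acceptStrings4 tensor maxLen out) := by
  unfold Spec_acceptStrings4; infer_instance

-- ===== CLAIM (what is proved, stated in full; the proofs are below) =====
def Claim_equal_acceptStrings4 : Prop := ∀ (tensor : List (List (List Int))) (maxLen : Int),
  Dom_acceptStrings4 tensor maxLen → Pre_acceptStrings4 tensor maxLen →
  Spec_acceptStrings4 tensor maxLen (acceptStrings4 tensor maxLen)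

-- ===== LEMMAS AND PROOFS =====

def pvShape (T : List (List (List (List String)))) (n m : Nat) : Prop :=
  T.length = n ∧ ∀ s, s < n → (T.getD s []).length = n ∧
    ∀ d, d < n → ((T.getD s []).getD d []).length = m

theorem pv_getD_modify {α : Type} (l : List α) (i j : Nat) (f : α → α) (dflt : α) :
    (l.modify i f).getD j dflt =
      if i = j ∧ j < l.length then f (l.getD j dflt) else l.getD j dflt := by
  rcases Nat.lt_or_ge j l.length with h | h
  · simp only [List.getD_eq_getElem?_getD, List.getElem?_modify, List.getElem?_eq_getElem h]
    by_cases hij : i = j <;> simp [hij, h]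
  · have h1 : l[j]? = none := List.getElem?_eq_none h
    simp only [List.getD_eq_getElem?_getD, List.getElem?_modify, h1]
    simp
    omega

theorem pvShape_pvAdd {T n m} (h : pvShape T n m) (s d e : Nat) (x : String) :
    pvShape (pvAdd T s d e x) n m := by
  obtain ⟨hl, hr⟩ := h
  refine ⟨by simp [pvAdd, hl], ?_⟩
  intro s' hs'
  rw [pvAdd, pv_getD_modify]
  by_cases hss : s = s' ∧ s' < T.length
  · obtain ⟨hrow, hcell⟩ := hr s' hs'
    rw [if_pos hss]
    refine ⟨by rw [List.length_modify]; exact hrow, ?_⟩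
    intro d' hd'
    rw [pv_getD_modify]
    by_cases hdd : d = d' ∧ d' < (T.getD s' []).length
    · rw [if_pos hdd, List.length_modify]
      exact hcell d' hd'
    · rw [if_neg hdd]
      exact hcell d' hd'
  · rw [if_neg hss]
    exact hr s' hs'

theorem pvCell_pvAdd_ne {T : List (List (List (List String)))} {s d e s' d' e' : Nat} {x : String}
    (h : ¬(s = s' ∧ d = d' ∧ e = e')) :
    pvCell (pvAdd T s d e x) s' d' e' = pvCell T s' d' e' := by
  unfold pvCell pvAdd
  rw [pv_getD_modify]
  by_cases hss : s = s' ∧ s' < T.length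
  · rw [if_pos hss, pv_getD_modify]
    by_cases hdd : d = d' ∧ d' < (T.getD s' []).length
    · rw [if_pos hdd, pv_getD_modify]
      have hne : ¬(e = e' ∧ e' < ((T.getD s' []).getD d' []).length) := by
        intro hc; exact h ⟨hss.1, hdd.1, hc.1⟩
      rw [if_neg hne]
    · rw [if_neg hdd]
  · rw [if_neg hss]

theorem pvCell_pvAdd_self {T n m} (h : pvShape T n m) {s d e : Nat} (x : String)
    (hs : s < n) (hd : d < n) (he : e < m) :
    pvCell (pvAdd T s d e x) s d e = PySem.Set.add (pvCell T s d e) x := by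
  obtain ⟨hl, hr⟩ := h
  obtain ⟨hrow, hcell⟩ := hr s hs
  unfold pvCell pvAdd
  rw [pv_getD_modify, if_pos ⟨rfl, by omega⟩, pv_getD_modify,
    if_pos ⟨rfl, by omega⟩, pv_getD_modify, if_pos ⟨rfl, by rw [hcell d hd]; exact he⟩]

def pvGood (T : List (List (List (List String)))) (n m : Nat)
    (f : Nat → Nat → Nat → List String) : Prop :=
  pvShape T n m ∧ ∀ s d e, s < n → d < n → e < m → pvCell T s d e = f s d e

def pvUpd (f : Nat → Nat → Nat → List String) (s d e : Nat) (L : List String) :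
    Nat → Nat → Nat → List String :=
  fun s' d' e' => if s = s' ∧ d = d' ∧ e = e' then L.foldl PySem.Set.add (f s' d' e') else f s' d' e'

theorem pvGood_congr {T n m f g} (h : pvGood T n m f)
    (hfg : ∀ s d e, s < n → d < n → e < m → f s d e = g s d e) : pvGood T n m g :=
  ⟨h.1, fun s d e hs hd he => (h.2 s d e hs hd he).trans (hfg s d e hs hd he)⟩

theorem pvGood_pvAdd {T n m f} (h : pvGood T n m f) {s d e : Nat} (x : String)
    (hs : s < n) (hd : d < n) (he : e < m) :
    pvGood (pvAdd T s d e x) n m (pvUpd f s d e [x]) := by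
  refine ⟨pvShape_pvAdd h.1 s d e x, ?_⟩
  intro s' d' e' hs' hd' he'
  unfold pvUpd
  by_cases hc : s = s' ∧ d = d' ∧ e = e'
  · obtain ⟨rfl, rfl, rfl⟩ := hc
    rw [if_pos ⟨rfl, rfl, rfl⟩, pvCell_pvAdd_self h.1 x hs hd he, h.2 s d e hs hd he]
    rfl
  · rw [if_neg hc, pvCell_pvAdd_ne hc, h.2 s' d' e' hs' hd' he']

theorem pvUpd_append {f : Nat → Nat → Nat → List String} {s d e : Nat} (u v : List String) :
    ∀ s' d' e', pvUpd (pvUpd f s d e u) s d e v s' d' e' = pvUpd f s d e (u ++ v) s' d' e' := by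
  intro s' d' e'
  unfold pvUpd
  by_cases hc : s = s' ∧ d = d' ∧ e = e'
  · obtain ⟨rfl, rfl, rfl⟩ := hc
    simp [List.foldl_append]
  · simp [hc]

theorem pvUpd_nil {f : Nat → Nat → Nat → List String} {s d e : Nat} :
    ∀ s' d' e', pvUpd f s d e [] s' d' e' = f s' d' e' := by
  intro s' d' e'; unfold pvUpd; split <;> rfl

theorem pvGood_foldl_strings {n m : Nat} {s d e : Nat} (xs : List String)
    {T f} (h : pvGood T n m f) (hs : s < n) (hd : d < n) (he : e < m) :
    pvGood (xs.foldl (fun T x => pvAdd T s d e x) T) n m (pvUpd f s d e xs) := by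
  induction xs generalizing T f with
  | nil => exact pvGood_congr h (fun s' d' e' _ _ _ => (pvUpd_nil s' d' e').symm)
  | cons x xs ih =>
    have h1 := pvGood_pvAdd h x hs hd he
    have h2 := ih h1
    refine pvGood_congr h2 ?_
    intro s' d' e' _ _ _
    rw [pvUpd_append [x] xs s' d' e']
    rfl

def pvN (t : List (List (List Int))) : Nat := (t.headD []).length

abbrev pvEdge (t : List (List (List Int))) (sym s a : Nat) : Prop :=
  ((t.getD sym []).getD s []).getD a 0 = 1

def pvCellR (t : List (List (List Int))) : Nat → Nat → Nat → List String
  | 0, s, d => if s = d then [""] else []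
  | (e+1), s, d =>
      ((List.range t.length).flatMap (fun sym =>
        (List.range (pvN t)).flatMap (fun a =>
          if pvEdge t sym s a then
            (pvCellR t e a d).map (fun str => PySem.Int.toStr (sym : Int) ++ str)
          else []))).foldl PySem.Set.add []

def pvF (t : List (List (List Int))) (e : Nat) : Nat → Nat → Nat → List String :=
  fun s d j => if j < e then pvCellR t j s d else []

-- the strings pass e appends to cell (s,d): per-symbol block, then concatenated over the alphabet
def pvSymSeq (t : List (List (List Int))) (f : Nat → Nat → Nat → List String)
    (e s d sym : Nat) : List String :=
  (if e = 0 ∧ s = d then [""] else []) ++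
  (if e = 1 ∧ ((t.getD sym []).getD s []).getD d 0 = 1 then [PySem.Int.toStr (sym : Int)] else []) ++
  (if 1 < e then (List.range (pvN t)).flatMap (fun a =>
      if ((t.getD sym []).getD s []).getD a 0 = 1 then
        (f a d (e - 1)).map (fun str => PySem.Int.toStr (sym : Int) ++ str)
      else []) else [])

def pvSeqA (t : List (List (List Int))) (f : Nat → Nat → Nat → List String)
    (e s d : Nat) : List String :=
  (List.range t.length).flatMap (pvSymSeq t f e s d)

theorem pvUpd_level_ne {f : Nat → Nat → Nat → List String} {s d e : Nat} {L : List String}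
    {a d' j : Nat} (hj : j ≠ e) : pvUpd f s d e L a d' j = f a d' j := by
  unfold pvUpd
  rw [if_neg]
  intro hc; exact hj hc.2.2.symm

theorem pvA_afold {t : List (List (List Int))} {n m : Nat} {e s d sym : Nat}
    (hs : s < n) (hd : d < n) (he : e < m) (h1e : 1 < e) :
    ∀ (as : List Nat) {T f}, (∀ a ∈ as, a < n) → pvGood T n m f →
    pvGood (as.foldl (fun T a =>
        if ((t.getD sym []).getD s []).getD a 0 = 1 then
          (pvCell T a d (e - 1)).foldl (fun T str =>
            pvAdd T s d e (PySem.Int.toStr (sym : Int) ++ str)) T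
        else T) T) n m
      (pvUpd f s d e (as.flatMap (fun a =>
        if ((t.getD sym []).getD s []).getD a 0 = 1 then
          (f a d (e - 1)).map (fun str => PySem.Int.toStr (sym : Int) ++ str)
        else []))) := by
  intro as
  induction as with
  | nil =>
    intro T f _ h
    exact pvGood_congr h (fun s' d' e' _ _ _ => (pvUpd_nil s' d' e').symm)
  | cons a as ih =>
    intro T f has h
    simp only [List.foldl_cons, List.flatMap_cons]
    by_cases hedge : ((t.getD sym []).getD s []).getD a 0 = 1
    · rw [if_pos hedge]
      have hread : pvCell T a d (e - 1) = f a d (e - 1) :=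
        h.2 a d (e - 1) (has a (List.mem_cons_self)) hd (by omega)
      have hfold :
          (pvCell T a d (e - 1)).foldl (fun T str =>
              pvAdd T s d e (PySem.Int.toStr (sym : Int) ++ str)) T =
            ((f a d (e - 1)).map (fun str => PySem.Int.toStr (sym : Int) ++ str)).foldl
              (fun T x => pvAdd T s d e x) T := by
        rw [hread, List.foldl_map]
      rw [hfold]
      have h1 := pvGood_foldl_strings
        ((f a d (e - 1)).map (fun str => PySem.Int.toStr (sym : Int) ++ str)) h hs hd he
      have h2 := ih (fun a' ha' => has a' (List.mem_cons_of_mem a ha')) h1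
      refine pvGood_congr h2 ?_
      intro s' d' e' _ _ _
      have hflat : (as.flatMap (fun a' =>
          if ((t.getD sym []).getD s []).getD a' 0 = 1 then
            ((pvUpd f s d e ((f a d (e-1)).map (fun str => PySem.Int.toStr (sym : Int) ++ str)))
              a' d (e - 1)).map (fun str => PySem.Int.toStr (sym : Int) ++ str)
          else [])) = (as.flatMap (fun a' =>
          if ((t.getD sym []).getD s []).getD a' 0 = 1 then
            (f a' d (e - 1)).map (fun str => PySem.Int.toStr (sym : Int) ++ str)
          else [])) := by
        apply List.flatMap_congr
        intro a' _
        by_cases hedge' : ((t.getD sym []).getD s []).getD a' 0 = 1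
        · rw [if_pos hedge', if_pos hedge', pvUpd_level_ne (by omega)]
        · rw [if_neg hedge', if_neg hedge']
      rw [hflat, pvUpd_append, if_pos hedge]
    · rw [if_neg hedge, if_neg hedge]
      have h2 := ih (fun a' ha' => has a' (List.mem_cons_of_mem a ha')) h
      exact pvGood_congr h2 (by intro s' d' e' _ _ _; simp)

theorem pvSymSeq_congr {t : List (List (List Int))} {f f' : Nat → Nat → Nat → List String}
    {e s d sym : Nat} (h : 1 < e → ∀ a, a < pvN t → f a d (e - 1) = f' a d (e - 1)) :
    pvSymSeq t f e s d sym = pvSymSeq t f' e s d sym := by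
  unfold pvSymSeq
  by_cases h1e : 1 < e
  · rw [if_pos h1e, if_pos h1e]
    congr 1
    apply List.flatMap_congr
    intro a ha
    rw [h h1e a (List.mem_range.mp ha)]
  · rw [if_neg h1e, if_neg h1e]

theorem pvSeqA_congr {t : List (List (List Int))} {f f' : Nat → Nat → Nat → List String}
    {e s d : Nat} (h : 1 < e → ∀ a, a < pvN t → f a d (e - 1) = f' a d (e - 1)) :
    pvSeqA t f e s d = pvSeqA t f' e s d :=
  List.flatMap_congr (fun _ _ => pvSymSeq_congr h)

theorem pvA_symbody {t : List (List (List Int))} {n m : Nat} (hn : n = pvN t)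
    {e s d : Nat} (hs : s < n) (hd : d < n) (he : e < m) {T f} (h : pvGood T n m f)
    (sym : Nat) :
    pvGood (
      (fun T =>
        let T := if e = 0 ∧ s = d then pvAdd T s d e "" else T
        let T := if e = 1 ∧ ((t.getD sym []).getD s []).getD d 0 = 1 then
            pvAdd T s d e (PySem.Int.toStr (sym : Int)) else T
        if 1 < e then
          (List.range (pvN t)).foldl (fun T a =>
            if ((t.getD sym []).getD s []).getD a 0 = 1 then
              (pvCell T a d (e - 1)).foldl (fun T str =>
                pvAdd T s d e (PySem.Int.toStr (sym : Int) ++ str)) T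
            else T) T
        else T) T) n m
      (pvUpd f s d e (pvSymSeq t f e s d sym)) := by
  have h1 : pvGood (if e = 0 ∧ s = d then pvAdd T s d e "" else T) n m
      (pvUpd f s d e (if e = 0 ∧ s = d then [""] else [])) := by
    by_cases hc : e = 0 ∧ s = d
    · rw [if_pos hc, if_pos hc]; exact pvGood_pvAdd h "" hs hd he
    · rw [if_neg hc, if_neg hc]
      exact pvGood_congr h (fun s' d' e' _ _ _ => (pvUpd_nil s' d' e').symm)
  set f1 := pvUpd f s d e (if e = 0 ∧ s = d then [""] else []) with hf1
  have h2 : pvGood (if e = 1 ∧ ((t.getD sym []).getD s []).getD d 0 = 1 then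
        pvAdd (if e = 0 ∧ s = d then pvAdd T s d e "" else T) s d e (PySem.Int.toStr (sym : Int))
      else (if e = 0 ∧ s = d then pvAdd T s d e "" else T)) n m
      (pvUpd f1 s d e (if e = 1 ∧ ((t.getD sym []).getD s []).getD d 0 = 1 then
        [PySem.Int.toStr (sym : Int)] else [])) := by
    by_cases hc : e = 1 ∧ ((t.getD sym []).getD s []).getD d 0 = 1
    · rw [if_pos hc, if_pos hc]; exact pvGood_pvAdd h1 _ hs hd he
    · rw [if_neg hc, if_neg hc]
      exact pvGood_congr h1 (fun s' d' e' _ _ _ => (pvUpd_nil s' d' e').symm)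
  set f2 := pvUpd f1 s d e (if e = 1 ∧ ((t.getD sym []).getD s []).getD d 0 = 1 then
        [PySem.Int.toStr (sym : Int)] else []) with hf2
  by_cases h1e : 1 < e
  · simp only [if_pos h1e]
    have h3 := pvA_afold (t := t) (sym := sym) hs hd he h1e (List.range (pvN t))
      (fun a ha => hn ▸ List.mem_range.mp ha) h2
    refine pvGood_congr h3 ?_
    intro s' d' e' _ _ _
    have hc3 : (List.range (pvN t)).flatMap (fun a =>
        if ((t.getD sym []).getD s []).getD a 0 = 1 then
          (f2 a d (e - 1)).map (fun str => PySem.Int.toStr (sym : Int) ++ str)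
        else []) = (List.range (pvN t)).flatMap (fun a =>
        if ((t.getD sym []).getD s []).getD a 0 = 1 then
          (f a d (e - 1)).map (fun str => PySem.Int.toStr (sym : Int) ++ str)
        else []) := by
      apply List.flatMap_congr
      intro a _
      have : f2 a d (e - 1) = f a d (e - 1) := by
        rw [hf2, pvUpd_level_ne (by omega), hf1, pvUpd_level_ne (by omega)]
      rw [this]
    rw [hc3, hf2, hf1, pvUpd_append, pvUpd_append]
    unfold pvSymSeq
    rw [if_pos h1e]
    simp [List.append_assoc]
  · simp only [if_neg h1e]
    refine pvGood_congr h2 ?_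
    intro s' d' e' _ _ _
    rw [hf2, hf1, pvUpd_append]
    unfold pvSymSeq
    rw [if_neg h1e]
    simp

theorem pvUpd_ne {f : Nat → Nat → Nat → List String} {s d e : Nat} {L : List String}
    {s' d' e' : Nat} (h : ¬(s = s' ∧ d = d' ∧ e = e')) : pvUpd f s d e L s' d' e' = f s' d' e' := by
  unfold pvUpd; rw [if_neg h]

theorem pvA_symfold {t : List (List (List Int))} {n m : Nat} (hn : n = pvN t)
    {e s d : Nat} (hs : s < n) (hd : d < n) (he : e < m) :
    ∀ (syms : List Nat) {T f}, pvGood T n m f →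
    pvGood (syms.foldl (fun T sym =>
        let sym_adj_matrix := t.getD sym []
        let T := if e = 0 ∧ s = d then pvAdd T s d e "" else T
        let T := if e = 1 ∧ (sym_adj_matrix.getD s []).getD d 0 = 1 then
            pvAdd T s d e (PySem.Int.toStr (sym : Int)) else T
        if 1 < e then
          (List.range (pvN t)).foldl (fun T a =>
            if (sym_adj_matrix.getD s []).getD a 0 = 1 then
              (pvCell T a d (e - 1)).foldl (fun T str =>
                pvAdd T s d e (PySem.Int.toStr (sym : Int) ++ str)) T
            else T) T
        else T) T) n m
      (pvUpd f s d e (syms.flatMap (pvSymSeq t f e s d))) := by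
  intro syms
  induction syms with
  | nil =>
    intro T f h
    exact pvGood_congr h (fun s' d' e' _ _ _ => (pvUpd_nil s' d' e').symm)
  | cons sym syms ih =>
    intro T f h
    simp only [List.foldl_cons, List.flatMap_cons]
    have h1 := pvA_symbody hn hs hd he h sym
    have h2 := ih h1
    refine pvGood_congr h2 ?_
    intro s' d' e' _ _ _
    have hseq : syms.flatMap (pvSymSeq t (pvUpd f s d e (pvSymSeq t f e s d sym)) e s d) =
        syms.flatMap (pvSymSeq t f e s d) := by
      apply List.flatMap_congr
      intro sym' _
      exact pvSymSeq_congr (fun h1e a _ => pvUpd_level_ne (by omega))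
    rw [hseq, pvUpd_append]

theorem pvA_destfold {t : List (List (List Int))} {n m : Nat} (hn : n = pvN t)
    {e s : Nat} (hs : s < n) (he : e < m) :
    ∀ (ds : List Nat), ds.Nodup → (∀ d ∈ ds, d < n) → ∀ {T f}, pvGood T n m f →
    pvGood (ds.foldl (fun T dest =>
        (List.range t.length).foldl (fun T sym =>
          let sym_adj_matrix := t.getD sym []
          let T := if e = 0 ∧ s = dest then pvAdd T s dest e "" else T
          let T := if e = 1 ∧ (sym_adj_matrix.getD s []).getD dest 0 = 1 then
              pvAdd T s dest e (PySem.Int.toStr (sym : Int)) else T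
          if 1 < e then
            (List.range (pvN t)).foldl (fun T a =>
              if (sym_adj_matrix.getD s []).getD a 0 = 1 then
                (pvCell T a dest (e - 1)).foldl (fun T str =>
                  pvAdd T s dest e (PySem.Int.toStr (sym : Int) ++ str)) T
              else T) T
          else T) T) T) n m
      (fun s' d' e' => if s = s' ∧ e = e' ∧ d' ∈ ds then
        List.foldl PySem.Set.add (f s' d' e') (pvSeqA t f e s d') else f s' d' e') := by
  intro ds
  induction ds with
  | nil =>
    intro _ _ T f h
    exact pvGood_congr h (by intro s' d' e' _ _ _; simp)
  | cons d ds ih =>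
    intro hnd hds T f h
    simp only [List.foldl_cons]
    have h1 := pvA_symfold hn hs (hds d List.mem_cons_self) he (List.range t.length) h
    have h2 := ih hnd.of_cons (fun d' hd' => hds d' (List.mem_cons_of_mem d hd')) h1
    refine pvGood_congr h2 ?_
    intro s' d' e' _ _ _
    have hdne : d ∉ ds := (List.nodup_cons.mp hnd).1
    rw [show List.flatMap (pvSymSeq t f e s d) (List.range t.length) = pvSeqA t f e s d from rfl]
    set f1 := pvUpd f s d e (pvSeqA t f e s d) with hf1
    by_cases hc : s = s' ∧ e = e'
    · obtain ⟨hss', hee'⟩ := hc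
      by_cases hm : d' ∈ ds
      · have hdd' : d ≠ d' := fun hc => hdne (hc ▸ hm)
        rw [if_pos ⟨hss', hee', hm⟩, if_pos ⟨hss', hee', List.mem_cons_of_mem d hm⟩]
        have hseq : pvSeqA t f1 e s d' = pvSeqA t f e s d' :=
          pvSeqA_congr (fun h1e a _ => by rw [hf1, pvUpd_level_ne (by omega)])
        rw [hseq, hf1, pvUpd_ne (fun hc => hdd' hc.2.1)]
      · rw [if_neg (fun hc => hm hc.2.2)]
        by_cases hd'd : d' = d
        · subst hd'd
          rw [if_pos ⟨hss', hee', List.mem_cons_self⟩, hf1]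
          unfold pvUpd
          rw [if_pos ⟨hss', rfl, hee'⟩]
        · rw [if_neg (fun hc => hd'd (by
            rcases List.mem_cons.mp hc.2.2 with h' | h'
            · exact h'
            · exact absurd h' hm)), hf1, pvUpd_ne (fun hc => hd'd hc.2.1.symm)]
    · rw [if_neg (fun h' => hc ⟨h'.1, h'.2.1⟩), if_neg (fun h' => hc ⟨h'.1, h'.2.1⟩),
        hf1, pvUpd_ne (fun h' => hc ⟨h'.1, h'.2.2⟩)]

theorem pvA_sourcefold {t : List (List (List Int))} {n m : Nat} (hn : n = pvN t)
    {e : Nat} (he : e < m) :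
    ∀ (ss : List Nat), ss.Nodup → (∀ s ∈ ss, s < n) → ∀ {T f}, pvGood T n m f →
    pvGood (ss.foldl (fun T source =>
        (List.range n).foldl (fun T dest =>
          (List.range t.length).foldl (fun T sym =>
            let sym_adj_matrix := t.getD sym []
            let T := if e = 0 ∧ source = dest then pvAdd T source dest e "" else T
            let T := if e = 1 ∧ (sym_adj_matrix.getD source []).getD dest 0 = 1 then
                pvAdd T source dest e (PySem.Int.toStr (sym : Int)) else T
            if 1 < e then
              (List.range (pvN t)).foldl (fun T a =>
                if (sym_adj_matrix.getD source []).getD a 0 = 1 then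
                  (pvCell T a dest (e - 1)).foldl (fun T str =>
                    pvAdd T source dest e (PySem.Int.toStr (sym : Int) ++ str)) T
                else T) T
            else T) T) T) T) n m
      (fun s' d' e' => if e = e' ∧ s' ∈ ss then
        List.foldl PySem.Set.add (f s' d' e') (pvSeqA t f e s' d') else f s' d' e') := by
  intro ss
  induction ss with
  | nil =>
    intro _ _ T f h
    exact pvGood_congr h (by intro s' d' e' _ _ _; simp)
  | cons s ss ih =>
    intro hnd hss T f h
    simp only [List.foldl_cons]
    have hs : s < n := hss s List.mem_cons_self
    have h1 := pvA_destfold hn hs he (List.range n) (List.nodup_range)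
      (fun d hd => List.mem_range.mp hd) h
    set f1 : Nat → Nat → Nat → List String := (fun a b c =>
        if s = a ∧ e = c then List.foldl PySem.Set.add (f a b c) (pvSeqA t f e a b)
        else f a b c) with hf1
    have h1' := pvGood_congr (g := f1) h1 (by
      intro s' d' e' _ hd' _
      simp only [hf1]
      by_cases hc : s = s' ∧ e = e'
      · rw [if_pos ⟨hc.1, hc.2, List.mem_range.mpr hd'⟩, if_pos hc, hc.1]
      · rw [if_neg (fun h' => hc ⟨h'.1, h'.2.1⟩), if_neg hc])
    have h2 := ih hnd.of_cons (fun s' hs' => hss s' (List.mem_cons_of_mem s hs')) h1'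
    refine pvGood_congr h2 ?_
    intro s' d' e' _ _ _
    beta_reduce
    have hsne : s ∉ ss := (List.nodup_cons.mp hnd).1
    have hf1ne : ∀ a b c, ¬(s = a ∧ e = c) → f1 a b c = f a b c := by
      intro a b c hcc
      simp only [hf1]
      rw [if_neg hcc]
    have hf1eq : ∀ b, f1 s b e = List.foldl PySem.Set.add (f s b e) (pvSeqA t f e s b) := by
      intro b
      simp [hf1]
    by_cases hc : e = e'
    · by_cases hm : s' ∈ ss
      · have hssne : s ≠ s' := fun hcs => hsne (hcs ▸ hm)
        rw [if_pos ⟨hc, hm⟩, if_pos ⟨hc, List.mem_cons_of_mem s hm⟩]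
        have hseq : pvSeqA t f1 e s' d' = pvSeqA t f e s' d' :=
          pvSeqA_congr (fun h1e a _ => hf1ne a d' (e-1) (fun hcc => by omega))
        rw [hseq, hf1ne s' d' e' (fun hcc => hssne hcc.1)]
      · rw [if_neg (fun h' => hm h'.2)]
        by_cases hs's : s' = s
        · subst hs's
          subst hc
          rw [if_pos ⟨rfl, List.mem_cons_self⟩, hf1eq d']
        · rw [if_neg (fun h' => by
            rcases List.mem_cons.mp h'.2 with h'' | h''
            · exact hs's h''
            · exact hm h''), hf1ne s' d' e' (fun hcc => hs's hcc.1.symm)]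
    · rw [if_neg (fun h' => hc h'.1), if_neg (fun h' => hc h'.1),
        hf1ne s' d' e' (fun hcc => hc hcc.2)]

theorem pv_add_mem {acc : List String} {x : String} (h : x ∈ acc) :
    PySem.Set.add acc x = acc := by
  simp [PySem.Set.add, h]

theorem pv_foldl_add_all_mem : ∀ (L : List String) (acc : List String),
    (∀ x ∈ L, x ∈ acc) → L.foldl PySem.Set.add acc = acc := by
  intro L
  induction L with
  | nil => intro acc _; rfl
  | cons x xs ih =>
    intro acc h
    simp only [List.foldl_cons]
    rw [pv_add_mem (h x List.mem_cons_self)]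
    exact ih acc (fun y hy => h y (List.mem_cons_of_mem x hy))

theorem pv_flatMap_empties : ∀ (L : List Nat), L ≠ [] →
    (L.flatMap (fun _ => ([""] : List String))).foldl PySem.Set.add [] = [""] := by
  intro L hL
  match L with
  | x :: xs =>
    simp only [List.flatMap_cons, List.foldl_cons, List.foldl_append]
    show (xs.flatMap (fun _ => ([""] : List String))).foldl PySem.Set.add
        (PySem.Set.add [] "") = [""]
    have : PySem.Set.add ([] : List String) "" = [""] := by simp [PySem.Set.add]
    rw [this]
    apply pv_foldl_add_all_mem
    intro y hy
    rcases List.mem_flatMap.mp hy with ⟨_, _, hy2⟩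
    exact hy2

theorem pv_flatMap_single {g : Nat → List String} : ∀ (L : List Nat) (d : Nat),
    L.Nodup → d ∈ L → (∀ a ∈ L, a ≠ d → g a = []) → L.flatMap g = g d := by
  intro L
  induction L with
  | nil => intro d _ hd; exact absurd hd (by simp)
  | cons x xs ih =>
    intro d hnd hd hg
    simp only [List.flatMap_cons]
    rcases List.mem_cons.mp hd with rfl | hd'
    · have : xs.flatMap g = [] := by
        apply List.flatMap_eq_nil_iff.mpr
        intro a ha
        exact hg a (List.mem_cons_of_mem _ ha)
          (fun hc => (List.nodup_cons.mp hnd).1 (hc ▸ ha))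
      rw [this, List.append_nil]
    · have hx : g x = [] := hg x List.mem_cons_self
        (fun hc => (List.nodup_cons.mp hnd).1 (hc ▸ hd'))
      rw [hx, List.nil_append]
      exact ih d (List.nodup_cons.mp hnd).2 hd'
        (fun a ha hne => hg a (List.mem_cons_of_mem _ ha) hne)

theorem pv_getD_map_range {β : Type} (n : Nat) (g : Nat → β) (s : Nat) (dflt : β)
    (hs : s < n) : ((List.range n).map g).getD s dflt = g s := by
  rw [List.getD_eq_getElem _ _ (by simp [hs])]
  simp

-- pvSeqA over the reference table computes the reference cell of the next level
theorem pv_cellR_seqA {t : List (List (List Int))} {e s d : Nat}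
    (hs : s < pvN t) (hd : d < pvN t) :
    (pvSeqA t (pvF t e) e s d).foldl PySem.Set.add [] = pvCellR t e s d := by
  have htne : t ≠ [] := by
    intro hc; rw [hc] at hs; simp [pvN] at hs
  have hα : t.length ≠ 0 := fun hc => htne (List.length_eq_zero_iff.mp hc)
  match e with
  | 0 =>
    have hsym : ∀ f : Nat → Nat → Nat → List String, ∀ sym,
        pvSymSeq t f 0 s d sym = if s = d then [""] else [] := by
      intro f sym
      unfold pvSymSeq
      simp
    unfold pvSeqA
    rw [List.flatMap_congr (fun sym _ => hsym (pvF t 0) sym)]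
    by_cases hsd : s = d
    · simp only [if_pos hsd]
      rw [pv_flatMap_empties _ (by rw [Ne, List.range_eq_nil]; exact hα)]
      unfold pvCellR
      rw [if_pos hsd]
    · simp only [if_neg hsd]
      have : (List.range t.length).flatMap (fun _ => ([] : List String)) = [] := by simp
      rw [this]
      unfold pvCellR
      rw [if_neg hsd]
      rfl
  | 1 =>
    have hsym : ∀ sym, pvSymSeq t (pvF t 1) 1 s d sym =
        if pvEdge t sym s d then [PySem.Int.toStr (sym : Int)] else [] := by
      intro sym
      unfold pvSymSeq
      simp [pvEdge]
    have hinner : ∀ sym : Nat, (List.range (pvN t)).flatMap (fun a =>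
        if pvEdge t sym s a then
          (pvCellR t 0 a d).map (fun str => PySem.Int.toStr (sym : Int) ++ str)
        else []) = if pvEdge t sym s d then [PySem.Int.toStr (sym : Int)] else [] := by
      intro sym
      rw [pv_flatMap_single (List.range (pvN t)) d List.nodup_range (List.mem_range.mpr hd)]
      · by_cases hedge : pvEdge t sym s d
        · simp only [if_pos hedge]
          unfold pvCellR
          simp [String.append_empty]
        · simp only [if_neg hedge]
      · intro a _ hne
        by_cases hedge : pvEdge t sym s a
        · simp only [if_pos hedge]
          unfold pvCellR
          rw [if_neg hne]
          rfl
        · simp only [if_neg hedge]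
    unfold pvSeqA
    rw [List.flatMap_congr (fun sym _ => hsym sym)]
    conv_rhs => rw [pvCellR]
    rw [List.flatMap_congr (fun sym _ => hinner sym)]
  | (j+2) =>
    have hseq : pvSeqA t (pvF t (j+2)) (j+2) s d =
        (List.range t.length).flatMap (fun sym => (List.range (pvN t)).flatMap (fun a =>
          if pvEdge t sym s a then
            (pvCellR t (j+1) a d).map (fun str => PySem.Int.toStr (sym : Int) ++ str)
          else [])) := by
      unfold pvSeqA
      apply List.flatMap_congr
      intro sym _
      unfold pvSymSeq
      rw [if_neg (by omega), if_neg (by omega), if_pos (by omega)]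
      simp only [List.nil_append]
      apply List.flatMap_congr
      intro a _
      unfold pvEdge
      by_cases hedge : ((t.getD sym []).getD s []).getD a 0 = 1
      · rw [if_pos hedge, if_pos hedge]
        have : pvF t (j+2) a d (j+2-1) = pvCellR t (j+1) a d := by
          unfold pvF
          rw [show j+2-1 = j+1 from rfl, if_pos (by omega)]
        rw [this]
      · rw [if_neg hedge, if_neg hedge]
    rw [hseq]
    conv_rhs => rw [pvCellR]

theorem pv_init_good (t : List (List (List Int))) (n m : Nat) :
    pvGood ((List.range n).map (fun _ => (List.range n).map (fun _ =>
      (List.range m).map (fun _ => ([] : List String))))) n m (pvF t 0) := by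
  refine ⟨⟨by simp, ?_⟩, ?_⟩
  · intro s hs
    rw [pv_getD_map_range n _ s [] hs]
    refine ⟨by simp, ?_⟩
    intro d hd
    rw [pv_getD_map_range n _ d [] hd]
    simp
  · intro s d e hs hd he
    unfold pvCell
    rw [pv_getD_map_range n _ s [] hs, pv_getD_map_range n _ d [] hd,
      pv_getD_map_range m _ e [] he]
    unfold pvF
    rw [if_neg (by omega)]

theorem pvA_pass {t : List (List (List Int))} {n m : Nat} (hn : n = pvN t)
    {e : Nat} (he : e < m) {T} (h : pvGood T n m (pvF t e)) :
    pvGood ((List.range n).foldl (fun T source =>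
        (List.range n).foldl (fun T dest =>
          (List.range t.length).foldl (fun T sym =>
            let sym_adj_matrix := t.getD sym []
            let T := if e = 0 ∧ source = dest then pvAdd T source dest e "" else T
            let T := if e = 1 ∧ (sym_adj_matrix.getD source []).getD dest 0 = 1 then
                pvAdd T source dest e (PySem.Int.toStr (sym : Int)) else T
            if 1 < e then
              (List.range (pvN t)).foldl (fun T a =>
                if (sym_adj_matrix.getD source []).getD a 0 = 1 then
                  (pvCell T a dest (e - 1)).foldl (fun T str =>
                    pvAdd T source dest e (PySem.Int.toStr (sym : Int) ++ str)) T
                else T) T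
            else T) T) T) T) n m (pvF t (e+1)) := by
  have h1 := pvA_sourcefold hn he (List.range n) List.nodup_range
    (fun s hs => List.mem_range.mp hs) h
  refine pvGood_congr h1 ?_
  intro s' d' e' hs' hd' he'
  by_cases hc : e = e'
  · subst hc
    rw [if_pos ⟨rfl, List.mem_range.mpr hs'⟩]
    have hb : pvF t e s' d' e = [] := by unfold pvF; rw [if_neg (by omega)]
    have hr : pvF t (e+1) s' d' e = pvCellR t e s' d' := by
      unfold pvF; rw [if_pos (by omega)]
    rw [hb, hr]
    exact pv_cellR_seqA (hn ▸ hs') (hn ▸ hd')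
  · rw [if_neg (fun h' => hc h'.1)]
    show pvF t e s' d' e' = pvF t (e+1) s' d' e'
    unfold pvF
    by_cases hlt : e' < e
    · rw [if_pos hlt, if_pos (by omega)]
    · rw [if_neg hlt, if_neg (by omega)]

theorem pvA_levels {t : List (List (List Int))} {n m : Nat} (hn : n = pvN t) :
    ∀ k, k ≤ m → pvGood ((List.range k).foldl (fun T e =>
      (List.range n).foldl (fun T source =>
        (List.range n).foldl (fun T dest =>
          (List.range t.length).foldl (fun T sym =>
            let sym_adj_matrix := t.getD sym []
            let T := if e = 0 ∧ source = dest then pvAdd T source dest e "" else T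
            let T := if e = 1 ∧ (sym_adj_matrix.getD source []).getD dest 0 = 1 then
                pvAdd T source dest e (PySem.Int.toStr (sym : Int)) else T
            if 1 < e then
              (List.range (pvN t)).foldl (fun T a =>
                if (sym_adj_matrix.getD source []).getD a 0 = 1 then
                  (pvCell T a dest (e - 1)).foldl (fun T str =>
                    pvAdd T source dest e (PySem.Int.toStr (sym : Int) ++ str)) T
                else T) T
            else T) T) T) T)
      ((List.range n).map (fun _ => (List.range n).map (fun _ =>
        (List.range m).map (fun _ => ([] : List String)))))) n m (pvF t k) := by
  intro k
  induction k with
  | zero => intro _; exact pv_init_good t n m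
  | succ k ih =>
    intro hk
    rw [List.range_succ, List.foldl_append]
    simp only [List.foldl_cons, List.foldl_nil]
    exact pvA_pass hn hk (ih (by omega))

-- ===== B-side machinery: walks enumerated forward =====

-- the walks of length k from s: (endpoint, string) pairs in lexicographic order of the
-- (symbol, next-state) edge sequence; defined by the FIRST edge (matching A's recursion)
def pvW (t : List (List (List Int))) : Nat → Nat → List (Nat × String)
  | 0, s => [(s, "")]
  | (k+1), s => (List.range t.length).flatMap (fun sym =>
      (List.range (pvN t)).flatMap (fun a =>
        if pvEdge t sym s a then
          (pvW t k a).map (fun p => (p.1, PySem.Int.toStr (sym : Int) ++ p.2))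
        else []))

-- one forward step at the END of a walk: what B's inner loops generate from one frontier entry
def pvStep (t : List (List (List Int))) (p : Nat × String) : List (Nat × String) :=
  (List.range t.length).flatMap (fun sym =>
    (List.range (pvN t)).flatMap (fun b =>
      if pvEdge t sym p.1 b then [(b, p.2 ++ PySem.Int.toStr (sym : Int))] else []))

theorem pv_map_prep_step (t : List (List (List Int))) (c : String) (p : Nat × String) :
    (pvStep t p).map (fun q => (q.1, c ++ q.2)) = pvStep t (p.1, c ++ p.2) := by
  unfold pvStep
  rw [List.map_flatMap]
  apply List.flatMap_congr; intro sym _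
  rw [List.map_flatMap]
  apply List.flatMap_congr; intro b _
  by_cases hedge : pvEdge t sym p.1 b
  · simp only [if_pos hedge, List.map_cons, List.map_nil, String.append_assoc]
  · simp only [if_neg hedge, List.map_nil]

-- extending walks by a LAST edge = the first-edge recursion, one level up
theorem pvW_snoc (t : List (List (List Int))) :
    ∀ (k : Nat) (s : Nat), pvW t (k+1) s = (pvW t k s).flatMap (pvStep t) := by
  intro k
  induction k with
  | zero =>
    intro s
    show pvW t 1 s = pvStep t (s, "") ++ []
    rw [List.append_nil]
    unfold pvW pvStep
    apply List.flatMap_congr; intro sym _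
    apply List.flatMap_congr; intro a _
    by_cases hedge : pvEdge t sym s a
    · rw [if_pos hedge, if_pos hedge]
      show [(a, PySem.Int.toStr (sym : Int) ++ "")] = [(a, "" ++ PySem.Int.toStr (sym : Int))]
      rw [String.append_empty, String.empty_append]
    · rw [if_neg hedge, if_neg hedge]
  | succ k ih =>
    intro s
    show (List.range t.length).flatMap (fun sym =>
        (List.range (pvN t)).flatMap (fun a =>
          if pvEdge t sym s a then
            (pvW t (k+1) a).map (fun p => (p.1, PySem.Int.toStr (sym : Int) ++ p.2))
          else [])) = (pvW t (k+1) s).flatMap (pvStep t)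
    conv_rhs => rw [show pvW t (k+1) s = (List.range t.length).flatMap (fun sym =>
        (List.range (pvN t)).flatMap (fun a =>
          if pvEdge t sym s a then
            (pvW t k a).map (fun p => (p.1, PySem.Int.toStr (sym : Int) ++ p.2))
          else [])) from rfl]
    rw [List.flatMap_assoc]
    apply List.flatMap_congr; intro sym _
    rw [List.flatMap_assoc]
    apply List.flatMap_congr; intro a _
    by_cases hedge : pvEdge t sym s a
    · rw [if_pos hedge, if_pos hedge, ih a, List.map_flatMap, List.flatMap_map]
      apply List.flatMap_congr; intro p _
      show ((pvStep t p).map (fun q => (q.1, PySem.Int.toStr (sym : Int) ++ q.2))) =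
        pvStep t (p.1, PySem.Int.toStr (sym : Int) ++ p.2)
      exact pv_map_prep_step t _ p
    · rw [if_neg hedge, if_neg hedge]
      rfl

theorem pvW_fst_lt (t : List (List (List Int))) :
    ∀ (k : Nat) (s : Nat), s < pvN t → ∀ p ∈ pvW t k s, p.1 < pvN t := by
  intro k
  induction k with
  | zero =>
    intro s hs p hp
    simp only [pvW, List.mem_singleton] at hp
    subst hp; exact hs
  | succ k ih =>
    intro s _ p hp
    simp only [pvW] at hp
    rcases List.mem_flatMap.mp hp with ⟨sym, _, hp⟩
    rcases List.mem_flatMap.mp hp with ⟨a, ha, hp⟩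
    rw [List.mem_ite_nil_right] at hp
    rcases List.mem_map.mp hp.2 with ⟨q, hq, rfl⟩
    exact ih a (List.mem_range.mp ha) q hq

-- the strings of the walks from s to d, in walk order (no dedup)
def pvRawS (t : List (List (List Int))) (e s d : Nat) : List String :=
  (pvW t e s).filterMap (fun p => if p.1 = d then some p.2 else none)

theorem pv_filterMap_map_prep (d : Nat) (c : String) : ∀ (L : List (Nat × String)),
    (L.map (fun p => ((p.1 : Nat), c ++ p.2))).filterMap
        (fun p => if p.1 = d then some p.2 else none) =
      (L.filterMap (fun p => if p.1 = d then some p.2 else none)).map (fun w => c ++ w) := by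
  intro L
  induction L with
  | nil => rfl
  | cons p ps ih =>
    simp only [List.map_cons, List.filterMap_cons]
    by_cases hpd : p.1 = d
    · simp only [if_pos hpd, List.map_cons, ih]
    · simp only [if_neg hpd, ih]

theorem pvRawS_succ (t : List (List (List Int))) (e s d : Nat) :
    pvRawS t (e+1) s d = (List.range t.length).flatMap (fun sym =>
      (List.range (pvN t)).flatMap (fun a =>
        if pvEdge t sym s a then
          (pvRawS t e a d).map (fun str => PySem.Int.toStr (sym : Int) ++ str)
        else [])) := by
  show (((List.range t.length).flatMap (fun sym =>
      (List.range (pvN t)).flatMap (fun a =>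
        if pvEdge t sym s a then
          (pvW t e a).map (fun p => (p.1, PySem.Int.toStr (sym : Int) ++ p.2))
        else []))).filterMap (fun p => if p.1 = d then some p.2 else none)) = _
  rw [List.filterMap_flatMap]
  apply List.flatMap_congr; intro sym _
  rw [List.filterMap_flatMap]
  apply List.flatMap_congr; intro a _
  by_cases hedge : pvEdge t sym s a
  · rw [if_pos hedge, if_pos hedge]
    exact pv_filterMap_map_prep d _ (pvW t e a)
  · rw [if_neg hedge, if_neg hedge]
    rfl

-- ===== dedup commutation: ofList absorbs inner dedups =====

theorem pv_update_congr {acc : List String} {L L' : List String}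
    (h : PySem.Set.ofList L = PySem.Set.ofList L') :
    L.foldl PySem.Set.add acc = L'.foldl PySem.Set.add acc := by
  show PySem.Set.update acc L = PySem.Set.update acc L'
  rw [PySem.Set.update_eq_append_filter, PySem.Set.update_eq_append_filter, h]

theorem pv_ofList_flatMap_congr {α : Type} (L : List α) (g g' : α → List String)
    (h : ∀ x ∈ L, PySem.Set.ofList (g x) = PySem.Set.ofList (g' x)) :
    PySem.Set.ofList (L.flatMap g) = PySem.Set.ofList (L.flatMap g') := by
  suffices hgen : ∀ acc, (L.flatMap g).foldl PySem.Set.add acc =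
      (L.flatMap g').foldl PySem.Set.add acc by exact hgen []
  induction L with
  | nil => intro acc; rfl
  | cons x xs ih =>
    intro acc
    simp only [List.flatMap_cons, List.foldl_append]
    rw [pv_update_congr (h x List.mem_cons_self)]
    exact ih (fun y hy => h y (List.mem_cons_of_mem x hy)) _

theorem pv_ofList_map_ofList (h : String → String) : ∀ (M : List String),
    PySem.Set.ofList ((PySem.Set.ofList M).map h) = PySem.Set.ofList (M.map h) := by
  intro M
  induction M using List.reverseRecOn with
  | nil => rfl
  | append_singleton M x ih =>
    rw [PySem.Set.ofList_append_singleton, List.map_append, List.map_singleton,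
      PySem.Set.ofList_append_singleton]
    by_cases hx : x ∈ M
    · rw [PySem.Set.add_of_mem (by rw [PySem.Set.mem_ofList]; exact hx), ih,
        PySem.Set.add_of_mem (by rw [PySem.Set.mem_ofList]; exact List.mem_map_of_mem hx)]
    · rw [PySem.Set.add_of_not_mem (by rw [PySem.Set.mem_ofList]; exact hx), List.map_append,
        List.map_singleton, PySem.Set.ofList_append_singleton, ih]

-- A's deduped recursion computes the dedup of the raw walk-string list
theorem pv_cellR_eq_ofList_rawS (t : List (List (List Int))) :
    ∀ (e s d : Nat), pvCellR t e s d = PySem.Set.ofList (pvRawS t e s d) := by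
  intro e
  induction e with
  | zero =>
    intro s d
    show (if s = d then [""] else []) = PySem.Set.ofList (pvRawS t 0 s d)
    unfold pvRawS pvW
    by_cases hsd : s = d
    · rw [if_pos hsd]
      simp only [List.filterMap_cons, if_pos hsd, List.filterMap_nil]
      rfl
    · rw [if_neg hsd]
      simp only [List.filterMap_cons, if_neg hsd, List.filterMap_nil]
      rfl
  | succ e ih =>
    intro s d
    show ((List.range t.length).flatMap (fun sym =>
        (List.range (pvN t)).flatMap (fun a =>
          if pvEdge t sym s a then
            (pvCellR t e a d).map (fun str => PySem.Int.toStr (sym : Int) ++ str)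
          else []))).foldl PySem.Set.add [] = PySem.Set.ofList (pvRawS t (e+1) s d)
    rw [pvRawS_succ]
    show PySem.Set.ofList _ = PySem.Set.ofList _
    apply pv_ofList_flatMap_congr
    intro sym _
    apply pv_ofList_flatMap_congr
    intro a _
    by_cases hedge : pvEdge t sym s a
    · rw [if_pos hedge, if_pos hedge, ih a d]
      exact pv_ofList_map_ofList _ (pvRawS t e a d)
    · rw [if_neg hedge, if_neg hedge]

-- ===== B-side: flattening the nested loops, then the event-list effect on the table =====

theorem pv_foldl_ite_singleton {α β : Type} (c : Prop) [Decidable c]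
    (h : β → α → β) (z : β) (q : α) :
    List.foldl h z (if c then [q] else []) = if c then h z q else z := by
  split <;> rfl

-- B's two inner loops over one frontier entry = a fold over pvStep of that entry
theorem pvB_inner (t : List (List (List Int))) (s0 e : Nat) (p : Nat × String)
    (z : (List (List (List (List String)))) × List (Nat × String)) :
    (List.range t.length).foldl (fun TN sym =>
      let row := (t.getD sym []).getD p.1 []
      (List.range (pvN t)).foldl (fun TN b =>
        if row.getD b 0 = 1 then
          let w := p.2 ++ PySem.Int.toStr (sym : Int)
          (pvAdd TN.1 s0 b e w, TN.2 ++ [(b, w)])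
        else TN) TN) z =
    (pvStep t p).foldl (fun TN q => (pvAdd TN.1 s0 q.1 e q.2, TN.2 ++ [q])) z := by
  unfold pvStep
  rw [List.foldl_flatMap]
  apply List.foldl_ext
  intro z' sym _
  rw [List.foldl_flatMap]
  apply List.foldl_ext
  intro z'' b _
  rw [pv_foldl_ite_singleton]

-- the frontier pair-fold splits into the table fold and the concatenated event list
theorem pvB_pair_split (s0 e : Nat) :
    ∀ (evs : List (Nat × String)) (T : List (List (List (List String))))
      (NF : List (Nat × String)),
    evs.foldl (fun TN q => (pvAdd TN.1 s0 q.1 e q.2, TN.2 ++ [q])) (T, NF) =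
      (evs.foldl (fun T q => pvAdd T s0 q.1 e q.2) T, NF ++ evs) := by
  intro evs
  induction evs with
  | nil => intro T NF; simp
  | cons q evs ih =>
    intro T NF
    simp only [List.foldl_cons]
    rw [ih]
    simp

-- effect of an event list on the table: each cell (s0, d, e) receives the strings of the
-- events with endpoint d, in order
theorem pvB_events {n m : Nat} {s0 e : Nat} (hs0 : s0 < n) (he : e < m) :
    ∀ (evs : List (Nat × String)), (∀ q ∈ evs, q.1 < n) → ∀ {T f}, pvGood T n m f →
    pvGood (evs.foldl (fun T q => pvAdd T s0 q.1 e q.2) T) n m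
      (fun s d e' => if s = s0 ∧ e' = e then
        (evs.filterMap (fun q => if q.1 = d then some q.2 else none)).foldl
          PySem.Set.add (f s d e') else f s d e') := by
  intro evs
  induction evs with
  | nil =>
    intro _ T f h
    exact pvGood_congr h (by intro s d e' _ _ _; split <;> rfl)
  | cons q evs ih =>
    intro hb T f h
    simp only [List.foldl_cons]
    have h1 := pvGood_pvAdd h q.2 hs0 (hb q List.mem_cons_self) he
    have h2 := ih (fun q' hq' => hb q' (List.mem_cons_of_mem q hq')) h1
    refine pvGood_congr h2 ?_
    intro s d e' _ _ _
    by_cases hc : s = s0 ∧ e' = e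
    · obtain ⟨rfl, rfl⟩ := hc
      rw [if_pos ⟨rfl, rfl⟩, if_pos ⟨rfl, rfl⟩]
      simp only [List.filterMap_cons]
      by_cases hqd : q.1 = d
      · rw [if_pos hqd, List.foldl_cons]
        have hu : pvUpd f s q.1 e' [q.2] s d e' = PySem.Set.add (f s d e') q.2 := by
          unfold pvUpd
          rw [if_pos ⟨rfl, hqd, rfl⟩]
          rfl
        rw [hu]
      · rw [if_neg hqd]
        have hu : pvUpd f s q.1 e' [q.2] s d e' = f s d e' := by
          apply pvUpd_ne
          intro hcc; exact hqd hcc.2.1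
        rw [hu]
    · rw [if_neg hc, if_neg hc]
      apply pvUpd_ne
      intro hcc
      exact hc ⟨hcc.1.symm, hcc.2.2.symm⟩

-- the per-source invariant: rows of earlier sources are fully filled, the current source's
-- row is filled for levels < k, everything else is still empty
def pvGB (t : List (List (List Int))) (s0 k : Nat) : Nat → Nat → Nat → List String :=
  fun s d e' => if s < s0 ∨ (s = s0 ∧ e' < k) then pvCellR t e' s d else []

theorem pvB_level {t : List (List (List Int))} {n m : Nat} (hn : n = pvN t)
    {s0 e : Nat} (hs0 : s0 < n) (he : e < m) (h1e : 1 ≤ e)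
    {T} (h : pvGood T n m (pvGB t s0 e)) :
    pvGood ((pvW t (e-1) s0).foldl (fun TN p =>
        (List.range t.length).foldl (fun TN sym =>
          let row := (t.getD sym []).getD p.1 []
          (List.range (pvN t)).foldl (fun TN b =>
            if row.getD b 0 = 1 then
              let w := p.2 ++ PySem.Int.toStr (sym : Int)
              (pvAdd TN.1 s0 b e w, TN.2 ++ [(b, w)])
            else TN) TN) TN) (T, ([] : List (Nat × String)))).1 n m
      (pvGB t s0 (e+1)) ∧
    ((pvW t (e-1) s0).foldl (fun TN p =>
        (List.range t.length).foldl (fun TN sym =>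
          let row := (t.getD sym []).getD p.1 []
          (List.range (pvN t)).foldl (fun TN b =>
            if row.getD b 0 = 1 then
              let w := p.2 ++ PySem.Int.toStr (sym : Int)
              (pvAdd TN.1 s0 b e w, TN.2 ++ [(b, w)])
            else TN) TN) TN) (T, ([] : List (Nat × String)))).2 = pvW t e s0 := by
  have hflat : (pvW t (e-1) s0).foldl (fun TN p =>
      (List.range t.length).foldl (fun TN sym =>
        let row := (t.getD sym []).getD p.1 []
        (List.range (pvN t)).foldl (fun TN b =>
          if row.getD b 0 = 1 then
            let w := p.2 ++ PySem.Int.toStr (sym : Int)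
            (pvAdd TN.1 s0 b e w, TN.2 ++ [(b, w)])
          else TN) TN) TN) (T, ([] : List (Nat × String))) =
      ((pvW t (e-1) s0).flatMap (pvStep t)).foldl
        (fun TN q => (pvAdd TN.1 s0 q.1 e q.2, TN.2 ++ [q])) (T, []) := by
    rw [List.foldl_flatMap]
    apply List.foldl_ext
    intro z p _
    exact pvB_inner t s0 e p z
  have hW : (pvW t (e-1) s0).flatMap (pvStep t) = pvW t e s0 := by
    have := pvW_snoc t (e-1) s0
    rw [show e - 1 + 1 = e from by omega] at this
    exact this.symm
  rw [hflat, hW, pvB_pair_split]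
  constructor
  · have hev := pvB_events (n := n) (m := m) hs0 he (pvW t e s0)
      (fun q hq => hn ▸ pvW_fst_lt t e s0 (hn ▸ hs0) q hq) h
    refine pvGood_congr hev ?_
    intro s d e' hs hd he'
    unfold pvGB
    by_cases hc : s = s0 ∧ e' = e
    · obtain ⟨rfl, rfl⟩ := hc
      rw [if_pos ⟨rfl, rfl⟩]
      rw [if_neg (by omega), if_pos (by omega)]
      show (pvRawS t e' s d).foldl PySem.Set.add [] = pvCellR t e' s d
      rw [pv_cellR_eq_ofList_rawS]
      rfl
    · rw [if_neg hc]
      by_cases hc2 : s < s0 ∨ (s = s0 ∧ e' < e)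
      · rw [if_pos hc2, if_pos (by
          rcases hc2 with h' | ⟨h1, h2⟩
          · exact Or.inl h'
          · exact Or.inr ⟨h1, by omega⟩)]
      · rw [if_neg hc2, if_neg (by
          intro hcon
          rcases hcon with h' | ⟨h1, h2⟩
          · exact hc2 (Or.inl h')
          · have : e' = e ∨ e' < e := by omega
            rcases this with h3 | h3
            · exact hc ⟨h1, h3⟩
            · exact hc2 (Or.inr ⟨h1, h3⟩))]
  · rfl

theorem pvB_levels {t : List (List (List Int))} {n m : Nat} (hn : n = pvN t)
    {s0 : Nat} (hs0 : s0 < n) :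
    ∀ (cnt start : Nat), 1 ≤ start → start + cnt ≤ m →
    ∀ {T}, pvGood T n m (pvGB t s0 start) →
    pvGood ((List.range' start cnt).foldl (fun TF e =>
        TF.2.foldl (fun TN p =>
          (List.range t.length).foldl (fun TN sym =>
            let row := (t.getD sym []).getD p.1 []
            (List.range (pvN t)).foldl (fun TN b =>
              if row.getD b 0 = 1 then
                let w := p.2 ++ PySem.Int.toStr (sym : Int)
                (pvAdd TN.1 s0 b e w, TN.2 ++ [(b, w)])
              else TN) TN) TN) (TF.1, ([] : List (Nat × String))))
      (T, pvW t (start - 1) s0)).1 n m (pvGB t s0 (start + cnt)) := by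
  intro cnt
  induction cnt with
  | zero => intro start _ _ T h; exact h
  | succ k ih =>
    intro start h1 h2 T h
    rw [List.range'_succ]
    simp only [List.foldl_cons]
    obtain ⟨hgood, hsnd⟩ := pvB_level hn hs0 (e := start) (by omega) h1 h
    rw [show start + (k + 1) = start + 1 + k from by omega]
    have hstep := ih (start + 1) (by omega) (by omega) hgood
    rw [Nat.add_sub_cancel, ← hsnd, Prod.mk.eta] at hstep
    exact hstep

-- one full source: the diagonal '' plus the level loop fill row s0 completely
theorem pvB_source {t : List (List (List Int))} {n m : Nat} (hn : n = pvN t)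
    (maxLen : Int) (hm : m = maxLen.toNat) {s0 : Nat} (hs0 : s0 < n)
    {T} (h : pvGood T n m (pvGB t s0 0)) :
    pvGood ((List.range' 1 (maxLen.toNat - 1)).foldl (fun TF e =>
        TF.2.foldl (fun TN p =>
          (List.range t.length).foldl (fun TN sym =>
            let row := (t.getD sym []).getD p.1 []
            (List.range (pvN t)).foldl (fun TN b =>
              if row.getD b 0 = 1 then
                let w := p.2 ++ PySem.Int.toStr (sym : Int)
                (pvAdd TN.1 s0 b e w, TN.2 ++ [(b, w)])
              else TN) TN) TN) (TF.1, ([] : List (Nat × String))))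
      ((if 1 ≤ maxLen then pvAdd T s0 s0 0 "" else T), [(s0, "")])).1 n m
      (pvGB t (s0 + 1) 0) := by
  by_cases hml : 1 ≤ maxLen
  · have hm1 : 1 ≤ m := by omega
    rw [if_pos hml]
    have h1 : pvGood (pvAdd T s0 s0 0 "") n m (pvGB t s0 1) := by
      have := pvGood_pvAdd (e := 0) h "" hs0 hs0 (by omega)
      refine pvGood_congr this ?_
      intro s d e' _ _ _
      unfold pvGB
      by_cases hc : s0 = s ∧ s0 = d ∧ 0 = e'
      · obtain ⟨rfl, rfl, he0⟩ := hc
        unfold pvUpd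
        rw [if_pos ⟨rfl, rfl, he0⟩, if_pos (Or.inr ⟨rfl, by omega⟩)]
        beta_reduce
        rw [if_neg (by omega : ¬ (s0 < s0 ∨ (s0 = s0 ∧ e' < 0)))]
        rw [← he0]
        show PySem.Set.add [] "" = pvCellR t 0 s0 s0
        unfold pvCellR
        rw [if_pos rfl]
        rfl
      · rw [pvUpd_ne hc]
        by_cases hc2 : s < s0
        · rw [if_pos (Or.inl hc2), if_pos (Or.inl hc2)]
        · by_cases hc3 : s = s0 ∧ e' < 1
          · obtain ⟨rfl, he1⟩ := hc3
            have he0 : e' = 0 := by omega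
            subst he0
            rw [if_neg (by omega : ¬ (s < s ∨ (s = s ∧ (0:Nat) < 0))),
              if_pos (Or.inr ⟨rfl, by omega⟩)]
            have hds : d ≠ s := fun hc' => hc ⟨rfl, hc'.symm, rfl⟩
            unfold pvCellR
            rw [if_neg (fun hc' => hds hc'.symm)]
          · rw [if_neg (by
              intro hcon
              rcases hcon with h' | h' 
              · exact hc2 h'
              · exact hc3 ⟨h'.1, by omega⟩), if_neg (by
              intro hcon
              rcases hcon with h' | h'
              · exact hc2 h'
              · exact hc3 ⟨h'.1, by omega⟩)]
    have hlev := pvB_levels hn hs0 (m - 1) 1 le_rfl (by omega) h1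
    have hfr : pvW t (1 - 1) s0 = [(s0, "")] := rfl
    rw [hfr] at hlev
    rw [show (1 : Nat) + (m - 1) = m from by omega] at hlev
    rw [show maxLen.toNat - 1 = m - 1 from by omega]
    refine pvGood_congr hlev ?_
    intro s d e' _ _ he'
    unfold pvGB
    by_cases hc : s ≤ s0
    · rw [if_pos (by omega : s < s0 ∨ (s = s0 ∧ e' < m)),
        if_pos (by omega : s < s0 + 1 ∨ (s = s0 + 1 ∧ e' < 0))]
    · rw [if_neg (by omega : ¬ (s < s0 ∨ (s = s0 ∧ e' < m))),
        if_neg (by omega : ¬ (s < s0 + 1 ∨ (s = s0 + 1 ∧ e' < 0)))]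
  · -- maxLen ≤ 0: m = 0, everything is vacuous
    have hm0 : m = 0 := by omega
    rw [if_neg hml]
    rw [show maxLen.toNat - 1 = 0 from by omega]
    show pvGood ((List.range' 1 0).foldl _ (T, [(s0, "")])).1 n m (pvGB t (s0 + 1) 0)
    refine pvGood_congr h ?_
    intro s d e' _ _ he'
    exact absurd he' (by omega)

theorem pvB_sources {t : List (List (List Int))} {n m : Nat} (hn : n = pvN t)
    (maxLen : Int) (hm : m = maxLen.toNat) :
    ∀ k, k ≤ n → pvGood ((List.range k).foldl (fun T source =>
      ((List.range' 1 (maxLen.toNat - 1)).foldl (fun TF e =>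
          TF.2.foldl (fun TN p =>
            (List.range t.length).foldl (fun TN sym =>
              let row := (t.getD sym []).getD p.1 []
              (List.range (pvN t)).foldl (fun TN b =>
                if row.getD b 0 = 1 then
                  let w := p.2 ++ PySem.Int.toStr (sym : Int)
                  (pvAdd TN.1 source b e w, TN.2 ++ [(b, w)])
                else TN) TN) TN) (TF.1, ([] : List (Nat × String))))
        ((if 1 ≤ maxLen then pvAdd T source source 0 "" else T), [(source, "")])).1)
      ((List.range n).map (fun _ => (List.range n).map (fun _ =>
        (List.range m).map (fun _ => ([] : List String)))))) n m (pvGB t k 0) := by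
  intro k
  induction k with
  | zero =>
    intro _
    refine pvGood_congr (pv_init_good t n m) ?_
    intro s d e' _ _ _
    unfold pvF pvGB
    rw [if_neg (by omega), if_neg (by omega : ¬ (s < 0 ∨ (s = 0 ∧ e' < 0)))]
  | succ k ih =>
    intro hk
    rw [List.range_succ, List.foldl_append]
    simp only [List.foldl_cons, List.foldl_nil]
    exact pvB_source hn maxLen hm (by omega) (ih (by omega))

theorem pv_tables_eq {T T' : List (List (List (List String)))} {n m : Nat}
    (h : pvShape T n m) (h' : pvShape T' n m)
    (hc : ∀ s d e, s < n → d < n → e < m → pvCell T s d e = pvCell T' s d e) : T = T' := by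
  apply List.ext_getElem (by rw [h.1, h'.1])
  intro s hs1 hs2
  have hsn : s < n := by rw [← h.1]; exact hs1
  have hrow : T.getD s [] = T[s] := List.getD_eq_getElem T [] hs1
  have hrow' : T'.getD s [] = T'[s] := List.getD_eq_getElem T' [] hs2
  apply List.ext_getElem (by
    rw [← hrow, ← hrow', (h.2 s hsn).1, (h'.2 s hsn).1])
  intro d hd1 hd2
  have hdn : d < n := by
    have := (h.2 s hsn).1
    rw [← hrow, this] at hd1
    exact hd1
  have hcell : (T.getD s []).getD d [] = T[s][d] := by
    rw [hrow]; exact List.getD_eq_getElem _ [] hd1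
  have hcell' : (T'.getD s []).getD d [] = T'[s][d] := by
    rw [hrow']; exact List.getD_eq_getElem _ [] hd2
  apply List.ext_getElem (by
    rw [← hcell, ← hcell', (h.2 s hsn).2 d hdn, (h'.2 s hsn).2 d hdn])
  intro e he1 he2
  have hem : e < m := by
    have := (h.2 s hsn).2 d hdn
    rw [← hcell, this] at he1
    exact he1
  have g1 : pvCell T s d e = T[s][d][e] := by
    unfold pvCell
    rw [hcell]
    exact List.getD_eq_getElem _ [] he1
  have g2 : pvCell T' s d e = T'[s][d][e] := by
    unfold pvCell
    rw [hcell']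
    exact List.getD_eq_getElem _ [] he2
  rw [← g1, ← g2]
  exact hc s d e hsn hdn hem

-- ===== assembly: both ports build the table of reference cells pvF t maxLen.toNat =====

theorem pv_ports_eq (t : List (List (List Int))) (ml : Int) :
    acceptStrings4 t ml = acceptStrings4_alt t ml := by
  have hA : acceptStrings4 t ml = (List.range ml.toNat).foldl (fun T e =>
      (List.range (pvN t)).foldl (fun T source =>
        (List.range (pvN t)).foldl (fun T dest =>
          (List.range t.length).foldl (fun T sym =>
            let sym_adj_matrix := t.getD sym []
            let T := if e = 0 ∧ source = dest then pvAdd T source dest e "" else T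
            let T := if e = 1 ∧ (sym_adj_matrix.getD source []).getD dest 0 = 1 then
                pvAdd T source dest e (PySem.Int.toStr (sym : Int)) else T
            if 1 < e then
              (List.range (pvN t)).foldl (fun T a =>
                if (sym_adj_matrix.getD source []).getD a 0 = 1 then
                  (pvCell T a dest (e - 1)).foldl (fun T str =>
                    pvAdd T source dest e (PySem.Int.toStr (sym : Int) ++ str)) T
                else T) T
            else T) T) T) T)
      ((List.range (pvN t)).map (fun _ => (List.range (pvN t)).map (fun _ =>
        (List.range ml.toNat).map (fun _ => ([] : List String))))) := rfl
  have hB : acceptStrings4_alt t ml = (List.range (pvN t)).foldl (fun T source =>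
      ((List.range' 1 (ml.toNat - 1)).foldl (fun TF e =>
          TF.2.foldl (fun TN p =>
            (List.range t.length).foldl (fun TN sym =>
              let row := (t.getD sym []).getD p.1 []
              (List.range (pvN t)).foldl (fun TN b =>
                if row.getD b 0 = 1 then
                  let w := p.2 ++ PySem.Int.toStr (sym : Int)
                  (pvAdd TN.1 source b e w, TN.2 ++ [(b, w)])
                else TN) TN) TN) (TF.1, ([] : List (Nat × String))))
        ((if 1 ≤ ml then pvAdd T source source 0 "" else T), [(source, "")])).1)
      ((List.range (pvN t)).map (fun _ => (List.range (pvN t)).map (fun _ =>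
        (List.range ml.toNat).map (fun _ => ([] : List String))))) := rfl
  have hGA : pvGood (acceptStrings4 t ml) (pvN t) ml.toNat (pvF t ml.toNat) := by
    rw [hA]
    exact pvA_levels rfl ml.toNat le_rfl
  have hGB : pvGood (acceptStrings4_alt t ml) (pvN t) ml.toNat (pvF t ml.toNat) := by
    rw [hB]
    have := pvB_sources (t := t) (n := pvN t) (m := ml.toNat) rfl ml rfl (pvN t) le_rfl
    refine pvGood_congr this ?_
    intro s d e' hs _ he'
    unfold pvGB pvF
    rw [if_pos (Or.inl hs), if_pos he']
  exact pv_tables_eq hGA.1 hGB.1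
    (fun s d e hs hd he => (hGA.2 s d e hs hd he).trans (hGB.2 s d e hs hd he).symm)

-- ===== VERDICT (by name: the statement is the Claim_ definition above) =====
theorem acceptStrings4_spec : Claim_equal_acceptStrings4 := by
  intro tensor maxLen _ _
  unfold Spec_acceptStrings4
  exact pv_ports_eq tensor maxLen
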